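-- pv_equiv track=rewrite | github.com/opendr-eu/opendr | src/opendr/perception/object_tracking_3d/single_object_tracking/vpit/second_detector/run.py | image_to_feature_coordinates
-- ===== SOURCE A (Python) =====
-- def image_to_feature_coordinates(
--     pos, feature_blocks, overwrite_strides=None, upscaling_mode="none"
-- ):
--
--     result = pos
--
--     for i in range(feature_blocks):
--         stride = 2 if overwrite_strides is None else overwrite_strides[i]
--         result = (result + (stride - 1)) // stride
--
--     if upscaling_mode in ["raw", "processed"]:
--         for i in range(1, feature_blocks):
--             stride = 2 if overwrite_strides is None else overwrite_strides[i]
--             result = result * stride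
--
--     return result
-- ===== SOURCE B (Python) =====
-- def image_to_feature_coordinates(
--     pos, feature_blocks, overwrite_strides=None, upscaling_mode="none"
-- ):
--     n = feature_blocks if feature_blocks > 0 else 0
--     if overwrite_strides is None:
--         # all strides are 2: the chained ceiling division collapses to one
--         # arithmetic shift, since ceil(x / 2**n) == ((x - 1) >> n) + 1
--         result = ((pos - 1) >> n) + 1
--         if upscaling_mode in ("raw", "processed") and n > 0:
--             result <<= n - 1
--         return result
--     strides = [overwrite_strides[i] for i in range(feature_blocks)]
--     # ceil-style step (r + s - 1) // s == (r - 1) // s + 1, so carry t = r - 1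
--     # through the whole chain with plain floor divisions
--     t = pos - 1
--     for s in strides:
--         t //= s
--     result = t + 1
--     if upscaling_mode in ("raw", "processed"):
--         factor = 1
--         for s in strides[1:]:
--             factor *= s
--         result *= factor
--     return result
-- ===== Notes on version B (the rewrite author's own statement) =====
-- stated objective: alternative
-- what changed: The per-step ceiling division (r+s-1)//s is replaced via the identity (r+s-1)//s = (r-1)//s + 1 by carrying t = r-1 through plain floor divisions (collapsing to a single arithmetic shift ((pos-1)>>n)+1 in the default all-2-strides case), and the sequential upscaling loop becomes one multiplication by a precomputed factor (a shift by n-1 in the default case).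
import Mathlib
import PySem

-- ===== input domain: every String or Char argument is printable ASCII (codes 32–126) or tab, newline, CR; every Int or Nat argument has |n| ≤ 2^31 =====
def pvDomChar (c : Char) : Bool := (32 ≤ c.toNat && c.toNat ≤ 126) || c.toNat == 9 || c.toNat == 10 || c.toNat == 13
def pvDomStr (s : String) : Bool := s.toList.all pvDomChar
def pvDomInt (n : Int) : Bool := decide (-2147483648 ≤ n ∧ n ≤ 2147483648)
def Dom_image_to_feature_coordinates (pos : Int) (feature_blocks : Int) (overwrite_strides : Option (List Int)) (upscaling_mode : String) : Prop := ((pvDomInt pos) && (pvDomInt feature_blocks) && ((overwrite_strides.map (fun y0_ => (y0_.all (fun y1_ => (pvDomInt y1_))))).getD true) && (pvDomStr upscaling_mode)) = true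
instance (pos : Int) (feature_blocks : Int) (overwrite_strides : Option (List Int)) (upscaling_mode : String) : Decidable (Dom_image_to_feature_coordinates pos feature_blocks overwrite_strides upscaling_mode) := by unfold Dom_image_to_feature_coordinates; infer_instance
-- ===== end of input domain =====

-- B replaces A's per-step ceiling-division loop by the shift identity
-- (r + s - 1) // s = (r - 1) // s + 1 (carrying t = r - 1 through plain floor
-- divisions) and, in the default-stride case, by a single arithmetic shift;
-- the upscaling loop becomes one multiplication by a precomputed factor.

-- ===== PORT A =====
def image_to_feature_coordinates (pos : Int) (feature_blocks : Int) (overwrite_strides : Option (List Int)) (upscaling_mode : String) : Int :=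
  let result := (PySem.List.pyRange 0 feature_blocks 1).foldl
    (fun result i =>
      let stride : Int := match overwrite_strides with
        | none => 2
        | some l => PySem.List.pyGetD l i 0   -- IndexError excluded by Pre_
      PySem.Int.floordiv (result + (stride - 1)) stride) pos
  if upscaling_mode = "raw" ∨ upscaling_mode = "processed" then
    (PySem.List.pyRange 1 feature_blocks 1).foldl
      (fun result i =>
        let stride : Int := match overwrite_strides with
          | none => 2
          | some l => PySem.List.pyGetD l i 0
        result * stride) result
  else result

-- ===== PORT B =====
def image_to_feature_coordinates_alt (pos : Int) (feature_blocks : Int) (overwrite_strides : Option (List Int)) (upscaling_mode : String) : Int :=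
  let n : Nat := feature_blocks.toNat          -- = max(feature_blocks, 0)
  match overwrite_strides with
  | none =>
    let result := ((pos - 1) >>> n) + 1        -- Python's `>>`/`<<` on int = arithmetic shifts, exact
    if (upscaling_mode = "raw" ∨ upscaling_mode = "processed") ∧ 0 < n then
      result <<< (n - 1)
    else result
  | some l =>
    -- strides = [overwrite_strides[i] for i in range(feature_blocks)]; IndexError excluded by Pre_
    let strides := (PySem.List.pyRange 0 feature_blocks 1).map (fun i => PySem.List.pyGetD l i 0)
    let t := strides.foldl (fun t s => PySem.Int.floordiv t s) (pos - 1)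
    let result := t + 1
    if upscaling_mode = "raw" ∨ upscaling_mode = "processed" then
      result * (strides.drop 1).foldl (· * ·) 1
    else result

-- ===== PRECONDITION & SPEC =====
-- Pre_ excludes exactly the inputs where A raises: an overwrite_strides list
-- shorter than feature_blocks (IndexError) or containing a zero among the
-- strides actually used (ZeroDivisionError).
def pvPreB (feature_blocks : Int) (overwrite_strides : Option (List Int)) : Bool :=
  match overwrite_strides with
  | none => true
  | some l => decide (feature_blocks ≤ (l.length : Int)) && (l.take feature_blocks.toNat).all (fun x => x != 0)
def Pre_image_to_feature_coordinates (pos : Int) (feature_blocks : Int) (overwrite_strides : Option (List Int)) (upscaling_mode : String) : Prop :=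
  pvPreB feature_blocks overwrite_strides = true
instance (pos : Int) (feature_blocks : Int) (overwrite_strides : Option (List Int)) (upscaling_mode : String) : Decidable (Pre_image_to_feature_coordinates pos feature_blocks overwrite_strides upscaling_mode) := by unfold Pre_image_to_feature_coordinates; infer_instance

def pvWitness_image_to_feature_coordinates : Int × Int × Option (List Int) × String := (10, 3, none, "none")

def Spec_image_to_feature_coordinates (pos : Int) (feature_blocks : Int) (overwrite_strides : Option (List Int)) (upscaling_mode : String) (out : Int) : Prop := out = image_to_feature_coordinates_alt pos feature_blocks overwrite_strides upscaling_mode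
instance (pos : Int) (feature_blocks : Int) (overwrite_strides : Option (List Int)) (upscaling_mode : String) (out : Int) : Decidable (Spec_image_to_feature_coordinates pos feature_blocks overwrite_strides upscaling_mode out) := by unfold Spec_image_to_feature_coordinates; infer_instance

-- ===== CLAIM (what is proved, stated in full; the proofs are below) =====
def Claim_equal_image_to_feature_coordinates : Prop := ∀ (pos : Int) (feature_blocks : Int) (overwrite_strides : Option (List Int)) (upscaling_mode : String), Dom_image_to_feature_coordinates pos feature_blocks overwrite_strides upscaling_mode → Pre_image_to_feature_coordinates pos feature_blocks overwrite_strides upscaling_mode → Spec_image_to_feature_coordinates pos feature_blocks overwrite_strides upscaling_mode (image_to_feature_coordinates pos feature_blocks overwrite_strides upscaling_mode)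

-- ===== LEMMAS AND PROOFS =====

-- (r + (s-1)) // s = (r-1) // s + 1 for s ≠ 0 (Python floor division).
theorem pv_step_shift (r s : Int) (hs : s ≠ 0) :
    PySem.Int.floordiv (r + (s - 1)) s = PySem.Int.floordiv (r - 1) s + 1 := by
  have : r + (s - 1) = (r - 1) + 1 * s := by ring
  rw [this]
  exact Int.add_mul_fdiv_right (r - 1) 1 hs

-- A's ceiling-division chain equals B's floor-division chain on t = r - 1.
theorem pv_chain_shift (ss : List Int) : ∀ (r : Int), (∀ s ∈ ss, s ≠ 0) →
    ss.foldl (fun r s => PySem.Int.floordiv (r + (s - 1)) s) r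
      = ss.foldl (fun t s => PySem.Int.floordiv t s) (r - 1) + 1 := by
  induction ss with
  | nil => intro r _; simp
  | cons s ss ih =>
    intro r h
    simp only [List.foldl_cons]
    rw [pv_step_shift r s (h s (List.mem_cons_self))]
    rw [ih _ (fun x hx => h x (List.mem_cons_of_mem s hx))]
    simp

-- fold over range(n) reading l[k] = fold over the first n elements of l.
theorem pv_fold_index (f : Int → Int → Int) (l : List Int) :
    ∀ (n : Nat), n ≤ l.length → ∀ (init : Int),
    (List.range n).foldl (fun r k => f r (l.getD k 0)) init
      = (l.take n).foldl f init := by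
  intro n
  induction n with
  | zero => intro _ init; simp
  | succ m ih =>
    intro hm init
    have hmlt : m < l.length := by omega
    rw [List.range_succ, List.foldl_append]
    rw [ih (by omega) init]
    rw [List.take_add_one]
    rw [List.foldl_append]
    simp [List.getD, List.getElem?_eq_getElem hmlt]

-- the comprehension [l[k] for k in range(n)] is l.take n when n ≤ len(l)
theorem pv_map_range_take (l : List Int) :
    ∀ (n : Nat), n ≤ l.length →
    (List.range n).map (fun k => l.getD k 0) = l.take n := by
  intro n
  induction n with
  | zero => intro _; simp
  | succ m ih =>
    intro hm
    have hmlt : m < l.length := by omega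
    rw [List.range_succ, List.map_append, ih (by omega), List.take_add_one]
    simp [List.getD, List.getElem?_eq_getElem hmlt]

theorem pv_mul_foldl (xs : List Int) : ∀ (r : Int),
    xs.foldl (· * ·) r = r * xs.foldl (· * ·) 1 := by
  induction xs with
  | nil => intro r; simp
  | cons x xs ih => intro r; simp only [List.foldl_cons]; rw [ih (r * x), ih (1 * x)]; ring

theorem pv_getD_succ (l : List Int) (k : Nat) : l.getD (k + 1) 0 = (l.drop 1).getD k 0 := by
  cases l <;> simp [List.getD]

-- repeated ceil-halving collapses to one division by 2^n
theorem pv_half_chain (n : Nat) : ∀ (x : Int),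
    (List.range n).foldl (fun r _ => PySem.Int.floordiv (r + 1) 2) x
      = (x - 1) / 2 ^ n + 1 := by
  induction n with
  | zero => intro x; simp
  | succ m ih =>
    intro x
    rw [List.range_succ, List.foldl_append, ih x]
    simp only [List.foldl_cons, List.foldl_nil]
    have h1 : ((x - 1) / 2 ^ m + 1) + 1 = (x - 1) / 2 ^ m + 1 * 2 := by ring
    rw [h1]
    have h2 : PySem.Int.floordiv ((x - 1) / 2 ^ m + 1 * 2) 2 = (x - 1) / 2 ^ m / 2 + 1 := by
      have := Int.add_mul_fdiv_right ((x - 1) / 2 ^ m) 1 (by norm_num : (2:Int) ≠ 0)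
      rw [show PySem.Int.floordiv = Int.fdiv from rfl, this]
      rw [Int.fdiv_eq_ediv]
      simp
    rw [h2, Int.ediv_ediv_of_nonneg (by positivity), pow_succ]

theorem pv_mul_two_chain (m : Nat) : ∀ (res : Int),
    (List.range m).foldl (fun r _ => r * 2) res = res * 2 ^ m := by
  induction m with
  | zero => intro res; simp
  | succ k ih =>
    intro res
    rw [List.range_succ, List.foldl_append, ih res]
    simp [pow_succ]; ring

-- ===== VERDICT (by name: the statement is the Claim_ definition above) =====
theorem image_to_feature_coordinates_spec : Claim_equal_image_to_feature_coordinates := by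
  intro pos fb os um _ hpre
  unfold Spec_image_to_feature_coordinates
  unfold image_to_feature_coordinates image_to_feature_coordinates_alt
  cases os with
  | none =>
    simp only []
    rw [PySem.List.pyRange_one 0 fb, PySem.List.pyRange_one 1 fb, List.foldl_map, List.foldl_map]
    simp only [show (2:Int) - 1 = 1 from rfl, sub_zero]
    rw [pv_half_chain fb.toNat pos]
    rw [pv_mul_two_chain (fb - 1).toNat]
    rw [Int.shiftRight_eq_div_pow]
    by_cases hum : um = "raw" ∨ um = "processed"
    · simp only [hum, if_pos, true_and]
      by_cases hn : 0 < fb.toNat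
      · rw [if_pos hn]
        rw [Int.shiftLeft_eq]
        have h1 : (fb - 1).toNat = fb.toNat - 1 := by omega
        rw [h1]
        push_cast
        ring
      · rw [if_neg hn]
        have h0 : (fb - 1).toNat = 0 := by omega
        simp [h0]
    · simp [hum]
  | some l =>
    have hp : fb ≤ (l.length : Int) ∧ ∀ x ∈ l.take fb.toNat, x ≠ 0 := by
      unfold Pre_image_to_feature_coordinates pvPreB at hpre
      simpa using hpre
    obtain ⟨hlen, hnz⟩ := hp
    simp only []
    rw [PySem.List.pyRange_one 0 fb, PySem.List.pyRange_one 1 fb, List.foldl_map, List.foldl_map, List.map_map]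
    have hbody1 : (fun (r : Int) (k : Nat) =>
        PySem.Int.floordiv (r + (PySem.List.pyGetD l (0 + (k : Int)) 0 - 1)) (PySem.List.pyGetD l (0 + (k : Int)) 0))
        = fun (r : Int) (k : Nat) =>
        PySem.Int.floordiv (r + (l.getD k 0 - 1)) (l.getD k 0) := by
      funext r k
      simp
    have hbody2 : (fun (r : Int) (k : Nat) => r * PySem.List.pyGetD l (1 + (k : Int)) 0)
        = fun (r : Int) (k : Nat) => r * (l.drop 1).getD k 0 := by
      funext r k
      have hc : (1 : Int) + (k : Int) = ((k + 1 : Nat) : Int) := by push_cast; ring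
      rw [hc, PySem.List.pyGetD_natCast, pv_getD_succ]
    rw [hbody1, hbody2]
    have hcomp : ((fun i => PySem.List.pyGetD l i 0) ∘ fun (k : Nat) => (0 : Int) + (k : Int))
        = fun (k : Nat) => l.getD k 0 := by
      funext k
      simp
    rw [hcomp]
    simp only [sub_zero]
    rw [pv_map_range_take l fb.toNat (by omega)]
    rw [pv_fold_index (fun r s => PySem.Int.floordiv (r + (s - 1)) s) l fb.toNat (by omega) pos]
    rw [pv_chain_shift (l.take fb.toNat) pos hnz]
    by_cases hum : um = "raw" ∨ um = "processed"
    · simp only [hum, if_pos]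
      have hd : (fb - 1).toNat ≤ (l.drop 1).length := by
        simp only [List.length_drop]
        omega
      rw [pv_fold_index (· * ·) (l.drop 1) (fb - 1).toNat hd]
      rw [pv_mul_foldl]
      have htd : (l.drop 1).take ((fb - 1).toNat) = (l.take fb.toNat).drop 1 := by
        rw [List.drop_take]
        congr 1
        omega
      rw [htd]
    · simp [hum]
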